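-- pv_equiv track=rewrite | github.com/pypi-data/pypi-mirror-310 | packages/xython/xython-3.2.1-py3-none-any.whl/xython/youtil.py | change_data_position_by_two_index_for_list_2d
-- ===== SOURCE A (Python) =====
-- def change_data_position_by_two_index_for_list_2d(input_list_2d, input_no_list):
-- 	"""
-- 	2차원 리스트의 자료에서 각 라인별 2개의 위치를 바꾼는것
-- 	change_position_for_list_2d_by_two_index([[1,2,3], [4,5,6]], [0,2])
-- 	[[1,2,3], [4,5,6]] ==> [[3,2,1], [6,5,4]]
-- 	메뉴에서 제외
--
-- 	:param input_list_2d: list type 2dimension, 2차원의 리스트형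
-- 	:param input_no_list:
-- 	:return:
-- 	"""
-- 	for before, after in input_no_list:
-- 		for no in range(len(input_list_2d)):
-- 			value1 = input_list_2d[no][before]
-- 			value2 = input_list_2d[no][after]
-- 			input_list_2d[no][before] = value2
-- 			input_list_2d[no][after] = value1
-- 	return input_list_2d
-- ===== SOURCE B (Python) =====
-- def change_data_position_by_two_index_for_list_2d(input_list_2d, input_no_list):
-- 	# Alternative decomposition: build one column-permutation table per distinct row
-- 	# length (applying all swaps once to an index table), then rewrite each row in a
-- 	# single pass; mutates the rows in place and returns the same list, like A.
-- 	perms = {}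
-- 	for row in input_list_2d:
-- 		length = len(row)
-- 		perm = perms.get(length)
-- 		if perm is None:
-- 			perm = list(range(length))
-- 			for pair in input_no_list:
-- 				before = pair[0]
-- 				after = pair[1]
-- 				b = before + length if before < 0 else before
-- 				a = after + length if after < 0 else after
-- 				perm[b], perm[a] = perm[a], perm[b]
-- 			perms[length] = perm
-- 		row[:] = [row[j] for j in perm]
-- 	return input_list_2d
-- ===== Notes on version B (the rewrite author's own statement) =====
-- stated objective: alternative
-- what changed: Instead of re-swapping two cells of every row for every index pair (pairs as the outer loop), B composes all swaps once into an index-permutation table per distinct row length and rewrites each row in one pass.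
import Mathlib
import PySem

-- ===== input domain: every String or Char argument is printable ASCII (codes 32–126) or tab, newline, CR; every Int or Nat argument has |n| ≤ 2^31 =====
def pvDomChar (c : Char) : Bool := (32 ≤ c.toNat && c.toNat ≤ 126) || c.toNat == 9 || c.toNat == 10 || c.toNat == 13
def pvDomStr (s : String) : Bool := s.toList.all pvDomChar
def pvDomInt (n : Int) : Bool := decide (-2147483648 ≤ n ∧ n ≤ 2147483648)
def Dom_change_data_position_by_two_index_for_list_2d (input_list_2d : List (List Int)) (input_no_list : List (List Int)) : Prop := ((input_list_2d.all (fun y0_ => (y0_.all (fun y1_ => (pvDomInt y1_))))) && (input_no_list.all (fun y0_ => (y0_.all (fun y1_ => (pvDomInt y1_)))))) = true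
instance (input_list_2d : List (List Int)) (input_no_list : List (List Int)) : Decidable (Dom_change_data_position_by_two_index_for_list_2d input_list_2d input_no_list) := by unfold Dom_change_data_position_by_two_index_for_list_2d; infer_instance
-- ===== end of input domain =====

-- B changes the decomposition (per-length permutation table, one rewrite pass per row)
-- rather than per-pair cell swaps; equivalence is about the RETURN value — both
-- Pythons also mutate input_list_2d's rows in place to the same final state.

-- ===== PORT A =====
-- inner-loop body of A for one row: read row[before], row[after], then write both back swapped
def pvSwapRowA (before after : Int) (row : List Int) : List Int :=
  match PySem.List.pyGet? row before, PySem.List.pyGet? row after with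
  | some value1, some value2 =>
      PySem.List.pySetD (PySem.List.pySetD row before value2) after value1
  | _, _ => row  -- Python raises IndexError here; excluded by Pre_

def change_data_position_by_two_index_for_list_2d (input_list_2d : List (List Int)) (input_no_list : List (List Int)) : List (List Int) :=
  input_no_list.foldl (fun acc p =>
    match p with
    | [before, after] => acc.map (pvSwapRowA before after)
    | _ => acc  -- Python raises ValueError unpacking here; excluded by Pre_
  ) input_list_2d

-- ===== PORT B =====
-- b = before + length if before < 0 else before   (Python's negative-index rule)
def pvNormIdx (i : Int) (length : Nat) : Int := if i < 0 then i + length else i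

-- perm[b], perm[a] = perm[a], perm[b]; the guard totalizes the IndexError case (outside Pre_)
def pvPermSwap (perm : List Int) (b a : Int) : List Int :=
  if 0 ≤ b ∧ b < perm.length ∧ 0 ≤ a ∧ a < perm.length then
    (perm.set b.toNat (perm.getD a.toNat 0)).set a.toNat (perm.getD b.toNat 0)
  else perm

-- perm = list(range(length)); then the swap loop over input_no_list
def pvBuildPerm (length : Nat) (input_no_list : List (List Int)) : List Int :=
  input_no_list.foldl (fun perm p =>
    -- before = pair[0]; after = pair[1] (getD totalizes the IndexError case, outside Pre_)
    pvPermSwap perm (pvNormIdx (p.getD 0 0) length) (pvNormIdx (p.getD 1 0) length)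
  ) (PySem.List.pyRange 0 (length : Int) 1)

-- the row loop, carrying the perms cache (dict keyed by row length)
def pvAltGo (input_no_list : List (List Int)) : List (List Int) → PySem.Dict Int (List Int) → List (List Int)
  | [], _ => []
  | row :: rest, perms =>
    match perms.get? (row.length : Int) with
    | some perm => (perm.map (fun j => PySem.List.pyGetD row j 0)) :: pvAltGo input_no_list rest perms
    | none =>
        let perm := pvBuildPerm row.length input_no_list
        (perm.map (fun j => PySem.List.pyGetD row j 0)) ::
          pvAltGo input_no_list rest (perms.insert (row.length : Int) perm)

def change_data_position_by_two_index_for_list_2d_alt (input_list_2d : List (List Int)) (input_no_list : List (List Int)) : List (List Int) :=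
  pvAltGo input_no_list input_list_2d PySem.Dict.empty

-- ===== PRECONDITION & SPEC =====
-- Exactly the inputs on which the Python A returns (no exception): every pair unpacks to
-- two indices, and each index is a valid (possibly negative) Python index into every row.
def Pre_change_data_position_by_two_index_for_list_2d (input_list_2d : List (List Int)) (input_no_list : List (List Int)) : Prop :=
  (∀ p ∈ input_no_list, p.length = 2) ∧
  (∀ row ∈ input_list_2d, ∀ p ∈ input_no_list, ∀ i ∈ p, -(row.length : Int) ≤ i ∧ i < (row.length : Int))

instance (input_list_2d : List (List Int)) (input_no_list : List (List Int)) : Decidable (Pre_change_data_position_by_two_index_for_list_2d input_list_2d input_no_list) := by unfold Pre_change_data_position_by_two_index_for_list_2d; infer_instance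

def pvWitness_change_data_position_by_two_index_for_list_2d : List (List Int) × List (List Int) :=
  ([[1, 2, 3], [4, 5, 6]], [[0, 2], [-1, 1]])

def Spec_change_data_position_by_two_index_for_list_2d (input_list_2d : List (List Int)) (input_no_list : List (List Int)) (out : List (List Int)) : Prop := out = change_data_position_by_two_index_for_list_2d_alt input_list_2d input_no_list
instance (input_list_2d : List (List Int)) (input_no_list : List (List Int)) (out : List (List Int)) : Decidable (Spec_change_data_position_by_two_index_for_list_2d input_list_2d input_no_list out) := by unfold Spec_change_data_position_by_two_index_for_list_2d; infer_instance

-- ===== CLAIM (what is proved, stated in full; the proofs are below) =====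
def Claim_equal_change_data_position_by_two_index_for_list_2d : Prop := ∀ (input_list_2d : List (List Int)) (input_no_list : List (List Int)), Dom_change_data_position_by_two_index_for_list_2d input_list_2d input_no_list → Pre_change_data_position_by_two_index_for_list_2d input_list_2d input_no_list → Spec_change_data_position_by_two_index_for_list_2d input_list_2d input_no_list (change_data_position_by_two_index_for_list_2d input_list_2d input_no_list)

-- ===== LEMMAS AND PROOFS =====

-- xs[i] for a valid (possibly negative) Python index, as a clamped-getD read
theorem pvPyGet?_eq (xs : List Int) (i : Int) (h1 : -(xs.length:Int) ≤ i) (h2 : i < xs.length) :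
    PySem.List.pyGet? xs i = some (xs.getD (pvNormIdx i xs.length).toNat 0) := by
  unfold pvNormIdx
  rcases lt_or_ge i 0 with hneg | hpos
  · have hk : (xs.length - (-i).toNat) = (i + (xs.length:Int)).toNat := by omega
    have hlt : (i + (xs.length:Int)).toNat < xs.length := by omega
    simp [PySem.List.pyGet?, PySem.List.pyIdx?, hneg, not_le.mpr hneg, hk,
      List.getElem?_eq_getElem hlt, List.getD, h1]
  · have hlt : i.toNat < xs.length := by omega
    simp [PySem.List.pyGet?, PySem.List.pyIdx?, not_lt.mpr hpos, hpos, List.getD, h2]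

-- xs[i] = v for a valid (possibly negative) Python index, as List.set
theorem pvPySetD_eq (xs : List Int) (i : Int) (v : Int) (h1 : -(xs.length:Int) ≤ i) (h2 : i < xs.length) :
    PySem.List.pySetD xs i v = xs.set (pvNormIdx i xs.length).toNat v := by
  unfold pvNormIdx
  rcases lt_or_ge i 0 with hneg | hpos
  · have hk : (xs.length - (-i).toNat) = (i + (xs.length:Int)).toNat := by omega
    simp [PySem.List.pySetD, PySem.List.pySet?, PySem.List.pyIdx?, hneg, not_le.mpr hneg, hk, h1]
  · simp [PySem.List.pySetD, PySem.List.pySet?, PySem.List.pyIdx?, not_lt.mpr hpos, hpos, h2]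

theorem pv_permSwap_length (perm : List Int) (b a : Int) :
    (pvPermSwap perm b a).length = perm.length := by
  unfold pvPermSwap; split <;> simp

-- one swap of A on a row that is `perm.map (read of the original row)` is one table swap of B
theorem pv_swap_step (row perm : List Int) (b a : Int)
    (hlen : perm.length = row.length)
    (hb1 : -(row.length:Int) ≤ b) (hb2 : b < (row.length:Int))
    (ha1 : -(row.length:Int) ≤ a) (ha2 : a < (row.length:Int)) :
    pvSwapRowA b a (perm.map (fun j => PySem.List.pyGetD row j 0))
      = (pvPermSwap perm (pvNormIdx b row.length) (pvNormIdx a row.length)).map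
          (fun j => PySem.List.pyGetD row j 0) := by
  set g : Int → Int := fun j => PySem.List.pyGetD row j 0 with hg
  have hLmap : ((perm.map g).length : Int) = (row.length : Int) := by simp [hlen]
  have hnbB : 0 ≤ pvNormIdx b row.length ∧ pvNormIdx b row.length < (row.length:Int) := by
    unfold pvNormIdx; split <;> omega
  have hnaB : 0 ≤ pvNormIdx a row.length ∧ pvNormIdx a row.length < (row.length:Int) := by
    unfold pvNormIdx; split <;> omega
  set nb := (pvNormIdx b row.length).toNat with hnb
  set na := (pvNormIdx a row.length).toNat with hna
  have hnbL : nb < perm.length := by omega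
  have hnaL : na < perm.length := by omega
  set vb := perm.getD nb 0 with hvb
  set va := perm.getD na 0 with hva
  have e1 : PySem.List.pyGet? (perm.map g) b = some (g vb) := by
    rw [pvPyGet?_eq _ b (by omega) (by omega)]
    congr 1
    rw [show (perm.map g).length = row.length by simp [hlen],
        List.getD_eq_getElem _ _ (by simpa [hlen] using hnbL),
        List.getElem_map, hvb, List.getD_eq_getElem _ _ hnbL]
  have e2 : PySem.List.pyGet? (perm.map g) a = some (g va) := by
    rw [pvPyGet?_eq _ a (by omega) (by omega)]
    congr 1
    rw [show (perm.map g).length = row.length by simp [hlen],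
        List.getD_eq_getElem _ _ (by simpa [hlen] using hnaL),
        List.getElem_map, hva, List.getD_eq_getElem _ _ hnaL]
  have w1 : PySem.List.pySetD (perm.map g) b (g va) = (perm.set nb va).map g := by
    rw [pvPySetD_eq _ b _ (by omega) (by omega),
        show (perm.map g).length = row.length by simp [hlen], List.map_set]
  have w2 : PySem.List.pySetD ((perm.set nb va).map g) a (g vb)
      = ((perm.set nb va).set na vb).map g := by
    rw [pvPySetD_eq _ a _ (by simp [hlen]; omega) (by simp [hlen]; omega),
        show ((perm.set nb va).map g).length = row.length by simp [hlen]]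
    simp only [List.map_set]
    rw [← hna]
  have hguard : 0 ≤ pvNormIdx b row.length ∧ pvNormIdx b row.length < (perm.length:Int) ∧
      0 ≤ pvNormIdx a row.length ∧ pvNormIdx a row.length < (perm.length:Int) := by
    rw [hlen]; exact ⟨hnbB.1, hnbB.2, hnaB.1, hnaB.2⟩
  unfold pvSwapRowA
  rw [e1, e2]
  show PySem.List.pySetD (PySem.List.pySetD (perm.map g) b (g va)) a (g vb) = _
  rw [w1, w2]
  unfold pvPermSwap
  rw [if_pos hguard]

-- the whole pair loop of A on one row is B's table built by the same pair loop, then one read pass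
theorem pv_perRow_aux (row : List Int) (pairs : List (List Int)) :
    ∀ (perm : List Int), perm.length = row.length →
    (∀ p ∈ pairs, p.length = 2) →
    (∀ p ∈ pairs, ∀ i ∈ p, -(row.length : Int) ≤ i ∧ i < (row.length : Int)) →
    pairs.foldl (fun r p =>
        match p with
        | [before, after] => pvSwapRowA before after r
        | _ => r) (perm.map (fun j => PySem.List.pyGetD row j 0))
      = (pairs.foldl (fun perm p =>
          pvPermSwap perm (pvNormIdx (p.getD 0 0) row.length) (pvNormIdx (p.getD 1 0) row.length))
            perm).map (fun j => PySem.List.pyGetD row j 0) := by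
  induction pairs with
  | nil => intro perm _ _ _; rfl
  | cons p rest ih =>
    intro perm hlen hp hr
    match p with
    | [b, a] =>
      have hmemp : [b, a] ∈ [b, a] :: rest := List.mem_cons_self ..
      have hb' := hr _ hmemp b (by simp)
      have ha' := hr _ hmemp a (by simp)
      simp only [List.foldl_cons]
      rw [pv_swap_step row perm b a hlen hb'.1 hb'.2 ha'.1 ha'.2]
      exact ih _ (by rw [pv_permSwap_length]; exact hlen)
        (fun q hq => hp q (List.mem_cons_of_mem _ hq))
        (fun q hq => hr q (List.mem_cons_of_mem _ hq))
    | [] => simpa using hp [] (List.mem_cons_self ..)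
    | [_] => simpa using hp _ (List.mem_cons_self ..)
    | _ :: _ :: _ :: _ => simpa using hp _ (List.mem_cons_self ..)



theorem pv_perRow (pairs : List (List Int)) (row : List Int)
    (hp : ∀ p ∈ pairs, p.length = 2)
    (hr : ∀ p ∈ pairs, ∀ i ∈ p, -(row.length : Int) ≤ i ∧ i < (row.length : Int)) :
    pairs.foldl (fun r p =>
        match p with
        | [before, after] => pvSwapRowA before after r
        | _ => r) row
      = (pvBuildPerm row.length pairs).map (fun j => PySem.List.pyGetD row j 0) := by
  unfold pvBuildPerm
  conv_lhs => rw [← PySem.List.map_pyGetD_pyRange_zero (xs := row) (d := 0)]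
  rw [pv_perRow_aux row pairs _ (by simp [PySem.List.length_pyRange_one]) hp hr]
  simp only [PySem.List.len_eq]

theorem pv_foldl_map_comm (g : List Int → List Int → List Int) :
    ∀ (pairs rows : List (List Int)),
      pairs.foldl (fun acc p => acc.map (g p)) rows
        = rows.map (fun r => pairs.foldl (fun r p => g p r) r) := by
  intro pairs
  induction pairs with
  | nil => intro rows; simp
  | cons p rest ih =>
    intro rows
    simp only [List.foldl_cons]
    rw [ih, List.map_map]
    rfl

-- the cached dict only ever stores pvBuildPerm tables, so the row loop is a plain map
theorem pv_altGo_eq (pairs : List (List Int)) :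
    ∀ (rows : List (List Int)) (perms : PySem.Dict Int (List Int)),
      (∀ k v, perms.get? k = some v → 0 ≤ k ∧ v = pvBuildPerm k.toNat pairs) →
      pvAltGo pairs rows perms
        = rows.map (fun r => (pvBuildPerm r.length pairs).map (fun j => PySem.List.pyGetD r j 0)) := by
  intro rows
  induction rows with
  | nil => intro perms _; rfl
  | cons row rest ih =>
    intro perms hinv
    unfold pvAltGo
    cases hget : perms.get? (row.length : Int) with
    | some perm =>
      have := hinv _ _ hget
      simp only [Int.toNat_natCast] at this
      rw [this.2, List.map_cons, ih perms hinv]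
    | none =>
      have hinv' : ∀ k v, (perms.insert (row.length : Int) (pvBuildPerm row.length pairs)).get? k
          = some v → 0 ≤ k ∧ v = pvBuildPerm k.toNat pairs := by
        intro k v hkv
        rw [PySem.Dict.get?_insert] at hkv
        by_cases hk : k = (row.length : Int)
        · rw [if_pos hk] at hkv
          cases hkv
          exact ⟨by omega, by rw [hk, Int.toNat_natCast]⟩
        · rw [if_neg hk] at hkv
          exact hinv _ _ hkv
      dsimp only
      rw [List.map_cons, ih _ hinv']

-- ===== VERDICT (by name: the statement is the Claim_ definition above) =====
theorem change_data_position_by_two_index_for_list_2d_spec : Claim_equal_change_data_position_by_two_index_for_list_2d := by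
  intro rows pairs _ hpre
  obtain ⟨hp, hr⟩ := hpre
  unfold Spec_change_data_position_by_two_index_for_list_2d
  unfold change_data_position_by_two_index_for_list_2d change_data_position_by_two_index_for_list_2d_alt
  rw [pv_altGo_eq pairs rows PySem.Dict.empty (by intro k v h; simp [PySem.Dict.get?_empty] at h)]
  have := pv_foldl_map_comm (fun p r =>
    match p with
    | [before, after] => pvSwapRowA before after r
    | _ => r) pairs rows
  rw [show (fun (acc : List (List Int)) (p : List Int) =>
        match p with
        | [before, after] => acc.map (pvSwapRowA before after)
        | _ => acc)
      = (fun acc p => acc.map (fun r =>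
          match p with
          | [before, after] => pvSwapRowA before after r
          | _ => r)) from ?_]
  · rw [this]
    exact List.map_congr_left (fun r hrmem => pv_perRow pairs r hp (hr r hrmem))
  · funext acc p
    match p with
    | [] => simp
    | [_] => simp
    | _ :: _ :: _ :: _ => simp
    | [b, a] => simp
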